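-- pv_equiv track=rewrite | github.com/vm-wylbur/ntt | bin/ntt_copier_strategies.py | filter_longest_paths
-- ===== SOURCE A (Python) =====
-- def filter_longest_paths(paths: list[str]) -> set[str]:
--     """
--     Filter to keep only the longest (leaf) paths, removing ancestor directories.
--
--     Since mkdir(parents=True) creates all ancestors automatically, we only need
--     to create the deepest directories. This reduces redundant syscalls.
--
--     Args:
--         paths: List of directory path strings
--
--     Returns:
--         Set of leaf directory paths (those with no children in the input set)
--     """
--     sorted_paths = sorted(paths)
--     result = []
--
--     for i, path in enumerate(sorted_paths):
--         # Check if any subsequent path has this as a directory prefix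
--         is_prefix = False
--         for j in range(i + 1, len(sorted_paths)):
--             # Lexicographic sorting means once we don't match prefix, we're done
--             if not sorted_paths[j].startswith(path):
--                 break
--             # Check if it's a proper directory prefix (not just string prefix)
--             if sorted_paths[j].startswith(path + '/'):
--                 is_prefix = True
--                 break
--
--         if not is_prefix:
--             result.append(path)
--
--     return set(result)
-- ===== SOURCE B (Python) =====
-- def filter_longest_paths(paths: list[str]) -> set[str]:
--     """Keep only leaf paths: one pass collects every '/'-boundary prefix of
--     every path into an ancestors set; a path is kept iff it is not an ancestor."""
--     ancestors = set()
--     for p in paths: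
--         for i, ch in enumerate(p):
--             if ch == '/':
--                 ancestors.add(p[:i])
--     return {p for p in sorted(paths) if p not in ancestors}
-- ===== Notes on version B (the rewrite author's own statement) =====
-- stated objective: faster
-- what changed: Instead of sorting and, for each path, scanning forward through the sorted list for a descendant (quadratic in the worst case), B makes one pass collecting every '/'-boundary prefix of every path into an ancestors set and keeps exactly the paths not in that set.
import Mathlib
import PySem

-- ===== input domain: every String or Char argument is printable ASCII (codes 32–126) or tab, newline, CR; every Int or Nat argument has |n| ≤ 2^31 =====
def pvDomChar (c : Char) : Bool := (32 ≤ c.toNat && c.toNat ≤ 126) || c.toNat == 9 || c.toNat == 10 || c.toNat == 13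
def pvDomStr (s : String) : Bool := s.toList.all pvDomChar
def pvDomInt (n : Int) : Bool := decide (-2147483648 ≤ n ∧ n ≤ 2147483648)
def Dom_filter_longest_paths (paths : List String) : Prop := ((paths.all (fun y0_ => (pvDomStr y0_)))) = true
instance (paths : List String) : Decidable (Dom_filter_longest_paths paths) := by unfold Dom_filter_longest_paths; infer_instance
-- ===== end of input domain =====

-- B replaces A's per-path forward scan of the sorted list for a descendant (quadratic worst case)
-- by one pass that collects every '/'-boundary prefix of every path into an ancestors set
-- (measured faster). Both Pythons return a set; the ports represent it as the sorted list of its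
-- distinct elements.

-- ===== PORT A =====
-- inner loop 'for j in range(i+1, len(sorted_paths)): …' over the suffix after position i
def pvAScan (path : String) : List String → Bool
  | [] => false
  | q :: rest =>
    if ¬ (PySem.Str.startswith q path) then false          -- break: is_prefix stays False
    else if PySem.Str.startswith q (path ++ "/") then true -- is_prefix = True; break
    else pvAScan path rest

-- outer loop 'for i, path in enumerate(sorted_paths): …' appending path when no descendant found
def pvALoop : List String → List String
  | [] => []
  | p :: rest => if pvAScan p rest then pvALoop rest else p :: pvALoop rest

def filter_longest_paths (paths : List String) : List String :=
  PySem.Set.ofList (pvALoop (PySem.List.sorted paths (fun x => x) false))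

-- ===== PORT B =====
-- 'for i, ch in enumerate(p): if ch == '/': ancestors.add(p[:i])'
def pvBCollect (p : String) (s : PySem.Set String) : PySem.Set String :=
  (PySem.List.enumerate p.toList 0).foldl
    (fun s ic => if ic.2 = '/' then PySem.Set.add s (PySem.Str.slice p none (some ic.1)) else s) s

def filter_longest_paths_alt (paths : List String) : List String :=
  let ancestors : PySem.Set String := paths.foldl (fun s p => pvBCollect p s) PySem.Set.empty
  PySem.Set.ofList ((PySem.List.sorted paths (fun x => x) false).filter
    (fun p => !(PySem.Set.contains ancestors p)))

-- ===== PRECONDITION & SPEC =====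
def Spec_filter_longest_paths (paths : List String) (out : List String) : Prop := out = filter_longest_paths_alt paths
instance (paths : List String) (out : List String) : Decidable (Spec_filter_longest_paths paths out) := by unfold Spec_filter_longest_paths; infer_instance

-- ===== CLAIM (what is proved, stated in full; the proofs are below) =====
def Claim_equal_filter_longest_paths : Prop := ∀ (paths : List String), Dom_filter_longest_paths paths → Spec_filter_longest_paths paths (filter_longest_paths paths)

-- ===== LEMMAS AND PROOFS =====

-- 'q has p as a proper directory prefix' (q starts with p + '/'), as a Prop and as a Bool
def pvDirPre (p q : String) : Prop := p.toList ++ ['/'] <+: q.toList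

def pvDirPreB (p q : String) : Bool := decide (p.toList ++ ['/'] <+: q.toList)

theorem pvDirPreB_iff (p q : String) : pvDirPreB p q = true ↔ pvDirPre p q := by
  simp [pvDirPreB, pvDirPre]

-- lexicographic contiguity: if p ≤ r ≤ q (as char lists) and p is a prefix of q, p is a prefix of r
theorem pv_lex_contig : ∀ (p r q : List Char), ¬ List.Lex (· < ·) r p → ¬ List.Lex (· < ·) q r →
    p <+: q → p <+: r := by
  intro p
  induction p with
  | nil => intro r q _ _ _; exact List.nil_prefix
  | cons a p' ih =>
    intro r q hpr hqr hpq
    cases r with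
    | nil => exact absurd List.Lex.nil hpr
    | cons b r' =>
      obtain ⟨q', rfl, hpq'⟩ : ∃ q', q = a :: q' ∧ p' <+: q' := by
        cases q with
        | nil => simp at hpq
        | cons c q' =>
          rw [List.cons_prefix_cons] at hpq
          exact ⟨q', by rw [hpq.1], hpq.2⟩
      rcases lt_trichotomy a b with h | h | h
      · exact absurd (List.Lex.rel h) hqr
      · subst h
        have h1 : ¬ List.Lex (· < ·) r' p' := fun hl => hpr (List.Lex.cons hl)
        have h2 : ¬ List.Lex (· < ·) q' r' := fun hl => hqr (List.Lex.cons hl)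
        exact List.cons_prefix_cons.mpr ⟨rfl, ih r' q' h1 h2 hpq'⟩
      · exact absurd (List.Lex.rel h) hpr

-- a list followed by one more character is lexicographically above the list
theorem pv_lex_of_snoc_prefix : ∀ (l : List Char) (c : Char) (m : List Char),
    l ++ [c] <+: m → List.Lex (· < ·) l m := by
  intro l
  induction l with
  | nil =>
    intro c m h
    cases m with
    | nil => simp at h
    | cons b m' => exact List.Lex.nil
  | cons a l' ih =>
    intro c m h
    cases m with
    | nil => simp at h
    | cons b m' =>
      rw [List.cons_append, List.cons_prefix_cons] at h
      exact h.1 ▸ List.Lex.cons (ih c m' h.2)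

-- a proper directory prefix is strictly smaller
theorem pv_dirPre_lt {p q : String} (h : pvDirPre p q) : p < q := by
  rw [String.lt_iff_toList_lt]
  exact pv_lex_of_snoc_prefix p.toList '/' q.toList h

theorem pv_notlex {a b : String} (h : a ≤ b) : ¬ List.Lex (· < ·) b.toList a.toList :=
  fun hl => absurd (String.lt_iff_toList_lt.mpr hl) (not_lt.mpr h)

-- the inner scan on a sorted suffix finds a descendant iff one exists in the suffix
theorem pv_aScan_iff (p : String) (rest : List String)
    (hs : rest.Pairwise (· ≤ ·)) (hp : ∀ r ∈ rest, p ≤ r) :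
    pvAScan p rest = true ↔ ∃ q ∈ rest, pvDirPre p q := by
  induction rest with
  | nil => simp [pvAScan]
  | cons r rest ih =>
    have hpr : p ≤ r := hp r (List.mem_cons_self)
    have hsw : ∀ (s t : String), PySem.Str.startswith s t = true ↔ t.toList <+: s.toList := by
      intro s t; simp [PySem.Str.startswith_eq, PySem.Chars.startswith_iff]
    by_cases h2 : pvDirPre p r
    · have h2' : PySem.Str.startswith r (p ++ "/") = true := by
        rw [hsw]; simpa [pvDirPre] using h2
      have h1 : PySem.Str.startswith r p = true := by
        rw [hsw]
        exact ((p.toList.prefix_append ['/']).trans h2)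
      have ht : pvAScan p (r :: rest) = true := by
        unfold pvAScan
        rw [if_neg (not_not_intro h1), if_pos h2']
      simp only [ht, true_iff]
      exact ⟨r, List.mem_cons_self, h2⟩
    · by_cases h1 : PySem.Str.startswith r p = true
      · have h2' : ¬ PySem.Str.startswith r (p ++ "/") = true := by
          rw [hsw]; simpa [pvDirPre] using h2
        simp only [pvAScan, h1, not_true, if_false, if_neg h2']
        rw [ih hs.tail (fun x hx => hp x (List.mem_cons_of_mem r hx))]
        constructor
        · rintro ⟨q, hq, hd⟩; exact ⟨q, List.mem_cons_of_mem r hq, hd⟩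
        · rintro ⟨q, hq, hd⟩
          rcases List.mem_cons.mp hq with rfl | hq
          · exact absurd hd h2
          · exact ⟨q, hq, hd⟩
      · simp only [pvAScan, h1]
        constructor
        · intro h; cases h
        · rintro ⟨q, hq, hd⟩
          rcases List.mem_cons.mp hq with rfl | hq
          · exact absurd ((hsw q p).mpr ((p.toList.prefix_append ['/']).trans hd)) h1
          · -- contiguity: p ≤ r ≤ q and p a prefix of q force p to be a prefix of r
            have hrq : r ≤ q := (List.pairwise_cons.mp hs).1 q hq
            have : p.toList <+: r.toList :=
              pv_lex_contig p.toList r.toList q.toList (pv_notlex hpr) (pv_notlex hrq)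
                ((p.toList.prefix_append ['/']).trans hd)
            exact absurd ((hsw r p).mpr this) h1

-- the outer loop on a sorted, descendant-closed sublist keeps exactly the paths with no descendant
theorem pv_aLoop_eq (paths : List String) : ∀ (t : List String), t.Pairwise (· ≤ ·) →
    (∀ x ∈ t, x ∈ paths) → (∀ p q, p ∈ t → q ∈ paths → pvDirPre p q → q ∈ t) →
    pvALoop t = t.filter (fun p => !(paths.any (fun q => pvDirPreB p q))) := by
  intro t
  induction t with
  | nil => intro _ _ _; rfl
  | cons p rest ih =>
    intro hs hsub hcl
    have hple : ∀ r ∈ rest, p ≤ r := (List.pairwise_cons.mp hs).1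
    have hcl' : ∀ p' q, p' ∈ rest → q ∈ paths → pvDirPre p' q → q ∈ rest := by
      intro p' q hp' hq hd
      rcases List.mem_cons.mp (hcl p' q (List.mem_cons_of_mem p hp') hq hd) with rfl | h
      · exact absurd (lt_of_le_of_lt (hple p' hp') (pv_dirPre_lt hd)) (lt_irrefl q)
      · exact h
    have hscan : pvAScan p rest = true ↔ ∃ q ∈ paths, pvDirPre p q := by
      rw [pv_aScan_iff p rest hs.tail hple]
      constructor
      · rintro ⟨q, hq, hd⟩; exact ⟨q, hsub q (List.mem_cons_of_mem p hq), hd⟩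
      · rintro ⟨q, hq, hd⟩
        rcases List.mem_cons.mp (hcl p q List.mem_cons_self hq hd) with rfl | h
        · exact absurd (pv_dirPre_lt hd) (lt_irrefl q)
        · exact ⟨q, h, hd⟩
    have hrest := ih hs.tail (fun x hx => hsub x (List.mem_cons_of_mem p hx)) hcl'
    by_cases hd : ∃ q ∈ paths, pvDirPre p q
    · have hany : paths.any (fun q => pvDirPreB p q) = true := by
        simpa [pvDirPreB_iff] using hd
      simp [pvALoop, if_pos (hscan.mpr hd), hrest, hany]
    · have hany : paths.any (fun q => pvDirPreB p q) = false := by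
        simpa [pvDirPreB_iff] using hd
      have : pvAScan p rest = false := by
        rcases Bool.eq_false_or_eq_true (pvAScan p rest) with h | h
        · exact absurd (hscan.mp h) hd
        · exact h
      simp [pvALoop, this, hrest, hany]

-- membership in a fold of conditional Set.add
theorem pv_mem_foldl_add_if {α β : Type} [BEq α] [LawfulBEq α] (l : List β) (c : β → Prop)
    [DecidablePred c] (f : β → α) (s : PySem.Set α) (x : α) :
    x ∈ l.foldl (fun s b => if c b then PySem.Set.add s (f b) else s) s ↔
      x ∈ s ∨ ∃ b ∈ l, c b ∧ x = f b := by
  induction l generalizing s with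
  | nil => simp
  | cons b l ih =>
    simp only [List.foldl_cons, ih, List.mem_cons]
    by_cases hb : c b
    · simp only [if_pos hb, PySem.Set.mem_add]
      constructor
      · rintro ((h | h) | ⟨b', hb', hc', rfl⟩)
        · exact Or.inl h
        · exact Or.inr ⟨b, Or.inl rfl, hb, h⟩
        · exact Or.inr ⟨b', Or.inr hb', hc', rfl⟩
      · rintro (h | ⟨b', (rfl | hb'), hc', rfl⟩)
        · exact Or.inl (Or.inl h)
        · exact Or.inl (Or.inr rfl)
        · exact Or.inr ⟨b', hb', hc', rfl⟩
    · simp only [if_neg hb]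
      constructor
      · rintro (h | ⟨b', hb', hc', rfl⟩)
        · exact Or.inl h
        · exact Or.inr ⟨b', Or.inr hb', hc', rfl⟩
      · rintro (h | ⟨b', (rfl | hb'), hc', rfl⟩)
        · exact Or.inl h
        · exact absurd hc' hb
        · exact Or.inr ⟨b', hb', hc', rfl⟩

-- a directory-prefix snoc splits as a take plus the '/' at the boundary
theorem pv_take_split (x p : String) (hlen : x.toList.length + 1 ≤ p.toList.length)
    (h : x.toList ++ ['/'] <+: p.toList) :
    x.toList = p.toList.take x.toList.length ∧ ['/'] = [p.toList[x.toList.length]] := by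
  have ht : p.toList.take (x.toList.length + 1) = p.toList.take x.toList.length ++ [p.toList[x.toList.length]] := by
    rw [List.take_add_one, List.getElem?_eq_getElem (by omega)]
    rfl
  have heq : x.toList ++ ['/'] = p.toList.take x.toList.length ++ [p.toList[x.toList.length]] := by
    rw [← ht]
    simpa using List.prefix_iff_eq_take.mp h
  exact List.append_inj' heq rfl

-- dirPre as a '/'-boundary take
theorem pv_dirPre_iff_take (x p : String) :
    pvDirPre x p ↔ ∃ k, ∃ h : k < p.toList.length, p.toList[k] = '/' ∧ x.toList = p.toList.take k := by
  unfold pvDirPre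
  constructor
  · intro h
    have hlen : x.toList.length + 1 ≤ p.toList.length := by
      simpa using h.length_le
    refine ⟨x.toList.length, by omega, ?_, ?_⟩
    · exact ((List.cons.injEq _ _ _ _).mp (pv_take_split x p hlen h).2.symm).1.symm ▸ rfl
    · exact (pv_take_split x p hlen h).1
  · rintro ⟨k, hk, hc, hx⟩
    have : x.toList ++ ['/'] = p.toList.take (k + 1) := by
      rw [List.take_add_one, List.getElem?_eq_getElem hk, hx, hc]
      rfl
    rw [this]
    exact List.take_prefix _ _

-- one path's contribution to the ancestors set
theorem pv_bCollect_mem (p : String) (s : PySem.Set String) (x : String) :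
    x ∈ pvBCollect p s ↔ x ∈ s ∨ pvDirPre x p := by
  unfold pvBCollect
  refine (pv_mem_foldl_add_if (PySem.List.enumerate p.toList 0) (fun ic : Int × Char => ic.2 = '/')
    (fun ic => PySem.Str.slice p none (some ic.1)) s x).trans ?_
  apply or_congr_right
  rw [pv_dirPre_iff_take]
  constructor
  · rintro ⟨ic, hic, hc, rfl⟩
    obtain ⟨k, hk, rfl⟩ := (PySem.List.mem_enumerate_iff _ _ _).mp hic
    refine ⟨k, hk, hc, ?_⟩
    simp [PySem.List.slice_to_natCast]
  · rintro ⟨k, hk, hc, hx⟩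
    refine ⟨((0 : Int) + k, p.toList[k]), (PySem.List.mem_enumerate_iff _ _ _).mpr ⟨k, hk, rfl⟩, hc, ?_⟩
    rw [String.ext_iff]
    simpa [PySem.List.slice_to_natCast] using hx

-- the ancestors set contains exactly the strings with a '/'-boundary descendant in `paths`
theorem pv_ancestors_mem (paths : List String) (x : String) :
    x ∈ paths.foldl (fun s p => pvBCollect p s) PySem.Set.empty ↔ ∃ q ∈ paths, pvDirPre x q := by
  have gen : ∀ (s : PySem.Set String),
      x ∈ paths.foldl (fun s p => pvBCollect p s) s ↔ x ∈ s ∨ ∃ q ∈ paths, pvDirPre x q := by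
    induction paths with
    | nil => intro s; simp
    | cons p rest ih =>
      intro s
      simp only [List.foldl_cons, ih, pv_bCollect_mem, List.mem_cons]
      constructor
      · rintro ((h | h) | ⟨q, hq, hd⟩)
        · exact Or.inl h
        · exact Or.inr ⟨p, Or.inl rfl, h⟩
        · exact Or.inr ⟨q, Or.inr hq, hd⟩
      · rintro (h | ⟨q, (rfl | hq), hd⟩)
        · exact Or.inl (Or.inl h)
        · exact Or.inl (Or.inr hd)
        · exact Or.inr ⟨q, hq, hd⟩
  rw [gen PySem.Set.empty]
  simp [PySem.Set.empty]

-- ===== VERDICT (by name: the statement is the Claim_ definition above) =====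
theorem filter_longest_paths_spec : Claim_equal_filter_longest_paths := by
  intro paths _
  unfold Spec_filter_longest_paths filter_longest_paths filter_longest_paths_alt
  have hpw : (PySem.List.sorted paths (fun x => x) false).Pairwise (· ≤ ·) :=
    PySem.List.sorted_pairwise paths (fun x => x)
  rw [pv_aLoop_eq paths _ hpw
    (fun x hx => (PySem.List.mem_sorted _ _ _ _).mp hx)
    (fun p q _ hq _ => (PySem.List.mem_sorted _ _ _ _).mpr hq)]
  congr 1
  apply List.filter_congr
  intro p _
  congr 1
  rw [Bool.eq_iff_iff]
  simp only [List.any_eq_true, pvDirPreB_iff, PySem.Set.contains_iff]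
  exact (pv_ancestors_mem paths p).symm
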